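-- pv_equiv track=rewrite | github.com/ASSERT-KTH/Mokav | experiments/pynguin/c4b/return-lst/generated_tests/src_2616/4/src_2616.py | func
-- ===== SOURCE A (Python) =====
-- def func(*args):
-- 	ret_values = []
--
-- 	string = args[0]
-- 	ln = len(string)
-- 	if (ln == 1):
-- 	    ret_values.append(0)
-- 	elif (ln == 2):
-- 	    if (string != 'KV'):
-- 	        ret_values.append(1)
-- 	    else:
-- 	        ret_values.append(0)
-- 	else:
-- 	    chang = ['VVV', 'KKK']
-- 	    add = 0
-- 	    for i in chang:
-- 	        if string.count(i):
-- 	            add = 1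
-- 	            break
-- 	    if ((string[:3] == 'KKV') or (string[(- 3):] == 'KVV')):
-- 	        add = 1
-- 	    ret_values.append((string.count('VK') + add))
--
-- 	return ret_values
-- ===== SOURCE B (Python) =====
-- def func(*args):
--     string = args[0]
--     n = len(string)
--     if n == 1:
--         return [0]
--     if n == 2:
--         return [0 if string == 'KV' else 1]
--     vk = 0
--     flag = False
--     p2 = p1 = None
--     for c in string:
--         if p1 == 'V' and c == 'K':
--             vk += 1
--         if p2 == p1 and p1 == c and (c == 'V' or c == 'K'):
--             flag = True
--         p2, p1 = p1, c
--     if string[:3] == 'KKV' or string[-3:] == 'KVV':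
--         flag = True
--     return [vk + (1 if flag else 0)]
-- ===== Notes on version B (the rewrite author's own statement) =====
-- stated objective: alternative
-- what changed: Replaced the three separate substring scans of the general branch by one left-to-right pass that remembers the last two characters, counting V-then-K adjacencies and flagging any three consecutive equal V-or-K characters; the length-1/length-2 branches and the prefix/suffix checks are kept verbatim.
import Mathlib
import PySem

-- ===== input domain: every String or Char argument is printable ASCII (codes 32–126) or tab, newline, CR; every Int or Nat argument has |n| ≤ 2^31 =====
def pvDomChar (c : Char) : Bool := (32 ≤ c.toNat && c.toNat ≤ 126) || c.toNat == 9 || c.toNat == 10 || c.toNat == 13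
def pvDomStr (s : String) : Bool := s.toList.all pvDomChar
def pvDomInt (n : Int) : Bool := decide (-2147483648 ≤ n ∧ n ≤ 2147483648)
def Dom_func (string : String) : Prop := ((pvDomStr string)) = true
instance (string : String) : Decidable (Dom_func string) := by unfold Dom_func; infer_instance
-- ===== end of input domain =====

-- B replaces A's three substring scans in the general branch by one left-to-right pass over the
-- characters (same O(n) cost, one traversal instead of three); return values proved equal everywhere.

-- ===== PORT A =====
def func (string : String) : List Int :=
  let ln := PySem.Str.len string
  if ln = 1 then [0]
  else if ln = 2 then
    if string ≠ "KV" then [1] else [0]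
  else
    -- for i in ['VVV','KKK']: if string.count(i): add = 1; break
    let add : Int :=
      if PySem.Str.count string "VVV" ≠ 0 then 1
      else if PySem.Str.count string "KKK" ≠ 0 then 1
      else 0
    let add : Int :=
      if PySem.Str.slice string none (some 3) = "KKV" ∨
         PySem.Str.slice string (some (-3)) none = "KVV" then 1 else add
    [(PySem.Str.count string "VK" : Int) + add]

-- ===== PORT B =====
-- loop body of Source B: state (vk, flag, p2, p1); None ported as Option.none
def pvStep (s : Int × Bool × Option Char × Option Char) (c : Char) :
    Int × Bool × Option Char × Option Char :=
  let vk := if s.2.2.2 = some 'V' ∧ c = 'K' then s.1 + 1 else s.1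
  let flag := if s.2.2.1 = s.2.2.2 ∧ s.2.2.2 = some c ∧ (c = 'V' ∨ c = 'K') then true else s.2.1
  (vk, flag, s.2.2.2, some c)

def func_alt (string : String) : List Int :=
  let n := PySem.Str.len string
  if n = 1 then [0]
  else if n = 2 then [if string = "KV" then 0 else 1]
  else
    let r := string.toList.foldl pvStep (0, false, none, none)
    let flag :=
      if PySem.Str.slice string none (some 3) = "KKV" ∨
         PySem.Str.slice string (some (-3)) none = "KVV" then true else r.2.1
    [r.1 + (if flag then 1 else 0)]

-- ===== PRECONDITION & SPEC =====
def Spec_func (string : String) (out : List Int) : Prop := out = func_alt string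
instance (string : String) (out : List Int) : Decidable (Spec_func string out) := by unfold Spec_func; infer_instance

-- ===== CLAIM (what is proved, stated in full; the proofs are below) =====
def Claim_equal_func : Prop := ∀ (string : String), Dom_func string → Spec_func string (func string)

-- ===== LEMMAS AND PROOFS =====

-- number of indices i with cs[i] = 'V', cs[i+1] = 'K'
def pairVK : List Char → Nat
  | a :: b :: t => (if a = 'V' ∧ b = 'K' then 1 else 0) + pairVK (b :: t)
  | _ => 0

-- some three consecutive equal characters, all 'V' or all 'K'
def hasTriple : List Char → Bool
  | a :: b :: c :: t => (a = b ∧ b = c ∧ (a = 'V' ∨ a = 'K')) || hasTriple (b :: c :: t)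
  | _ => false

theorem pairVK_not_V {c : Char} (h : c ≠ 'V') (t : List Char) : pairVK (c :: t) = pairVK t := by
  cases t with
  | nil => simp [pairVK]
  | cons b t => simp [pairVK, h]

theorem count_go_VK (fuel : Nat) (cs : List Char) (acc : Nat) (h : cs.length ≤ fuel) :
    PySem.Chars.count.go ['V', 'K'] fuel cs acc = acc + pairVK cs := by
  induction fuel generalizing cs acc with
  | zero =>
    have : cs = [] := List.length_eq_zero_iff.mp (Nat.le_zero.mp h)
    subst this; rw [PySem.Chars.count.go.eq_def]; simp [pairVK]
  | succ fuel ih =>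
    match cs with
    | [] => rw [PySem.Chars.count.go.eq_def]; simp [pairVK]
    | [a] =>
      rw [PySem.Chars.count.go.eq_def]
      have hpre : ['V','K'].isPrefixOf [a] = false := by
        cases hx : ['V','K'].isPrefixOf [a]
        · rfl
        · have := (List.isPrefixOf_iff_prefix.mp hx).length_le
          simp at this
      simp only [hpre, Bool.false_eq_true, if_false, pairVK]
      rw [PySem.Chars.count.go.eq_def]
      cases fuel <;> simp
    | a :: b :: t =>
      rw [PySem.Chars.count.go.eq_def]
      simp only [List.length_cons] at h
      by_cases hab : a = 'V' ∧ b = 'K'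
      · have hpre : ['V','K'].isPrefixOf (a :: b :: t) = true := by
          refine List.isPrefixOf_iff_prefix.mpr ⟨t, ?_⟩
          simp [hab.1, hab.2]
        have hdrop : List.drop (['V','K'] : List Char).length (a :: b :: t) = t := rfl
        simp only [hpre, if_true, hdrop]
        rw [ih t (acc + 1) (by omega)]
        obtain ⟨ha, hb⟩ := hab; subst ha; subst hb
        have hbK : pairVK ('K' :: t) = pairVK t := pairVK_not_V (by decide) t
        simp only [pairVK, hbK]
        simp; omega
      · have hpre : ['V','K'].isPrefixOf (a :: b :: t) = false := by
          cases hx : ['V','K'].isPrefixOf (a :: b :: t)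
          · rfl
          · rcases List.isPrefixOf_iff_prefix.mp hx with ⟨s, hs⟩
            simp at hs
            exact absurd ⟨hs.1.symm, hs.2.1.symm⟩ hab
        simp only [hpre, Bool.false_eq_true, if_false]
        rw [ih (b :: t) acc (by simpa using Nat.le_of_succ_le_succ h)]
        simp [pairVK, hab]

theorem count_VK (s : String) : PySem.Str.count s "VK" = pairVK s.toList := by
  show PySem.Chars.count s.toList "VK".toList = _
  rw [PySem.Chars.count, if_neg (by decide)]
  have h : "VK".toList = ['V', 'K'] := by decide
  rw [h, count_go_VK s.toList.length s.toList 0 le_rfl]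
  omega

theorem acc_le_count_go (sub : List Char) (fuel : Nat) (cs : List Char) (acc : Nat) :
    acc ≤ PySem.Chars.count.go sub fuel cs acc := by
  induction fuel generalizing cs acc with
  | zero => rw [PySem.Chars.count.go.eq_def]
  | succ fuel ih =>
    cases cs with
    | nil => rw [PySem.Chars.count.go.eq_def]
    | cons a t =>
      rw [PySem.Chars.count.go.eq_def]
      simp only
      split_ifs with hp
      · exact le_trans (Nat.le_succ acc) (ih _ _)
      · exact ih _ _

theorem count_go_eq_zero_iff (sub : List Char) (hsub : sub ≠ []) (fuel : Nat) (cs : List Char)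
    (h : cs.length ≤ fuel) :
    (PySem.Chars.count.go sub fuel cs 0 = 0 ↔ ¬ sub <:+: cs) := by
  induction fuel generalizing cs with
  | zero =>
    have : cs = [] := List.length_eq_zero_iff.mp (Nat.le_zero.mp h)
    subst this
    rw [PySem.Chars.count.go.eq_def]
    simp [List.infix_iff_prefix_suffix, hsub]
  | succ fuel ih =>
    cases cs with
    | nil =>
      rw [PySem.Chars.count.go.eq_def]
      simp [hsub]
    | cons a t =>
      rw [PySem.Chars.count.go.eq_def]
      simp only [List.length_cons] at h
      simp only [Nat.zero_add]
      split_ifs with hp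
      · have h1 : 1 ≤ PySem.Chars.count.go sub fuel (List.drop sub.length (a :: t)) 1 :=
          acc_le_count_go _ _ _ _
        have hinf : sub <:+: a :: t := (List.isPrefixOf_iff_prefix.mp hp).isInfix
        constructor
        · intro h0; omega
        · intro hn; exact absurd hinf hn
      · rw [ih t (by omega)]
        rw [List.infix_cons_iff]
        have : ¬ sub <+: a :: t := fun hc => hp (List.isPrefixOf_iff_prefix.mpr hc)
        tauto

theorem count_eq_zero_iff (s : String) (sub : String) (hsub : sub.toList ≠ []) :
    (PySem.Str.count s sub = 0 ↔ ¬ sub.toList <:+: s.toList) := by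
  show PySem.Chars.count s.toList sub.toList = 0 ↔ _
  rw [PySem.Chars.count]
  simp only [List.isEmpty_iff, hsub, if_false]
  exact count_go_eq_zero_iff sub.toList hsub s.toList.length s.toList le_rfl

theorem hasTriple_iff (cs : List Char) :
    (hasTriple cs = true ↔ (['V','V','V'] <:+: cs ∨ ['K','K','K'] <:+: cs)) := by
  induction cs with
  | nil => simp [hasTriple]
  | cons a t ih =>
    match t with
    | [] =>
      simp [hasTriple, List.infix_cons_iff, List.cons_prefix_cons]
    | [b] =>
      simp [hasTriple, List.infix_cons_iff, List.cons_prefix_cons]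
    | b :: c :: t' =>
      show ((a = b ∧ b = c ∧ (a = 'V' ∨ a = 'K')) || hasTriple (b :: c :: t')) = true ↔ _
      rw [List.infix_cons_iff (l₁ := ['V','V','V']), List.infix_cons_iff (l₁ := ['K','K','K'])]
      simp only [Bool.or_eq_true, decide_eq_true_eq, ih, List.cons_prefix_cons]
      constructor
      · rintro (⟨h1, h2, (h3 | h3)⟩ | h | h)
        · subst h1; subst h2; subst h3
          exact Or.inl (Or.inl ⟨rfl, rfl, rfl, List.nil_prefix⟩)
        · subst h1; subst h2; subst h3
          exact Or.inr (Or.inl ⟨rfl, rfl, rfl, List.nil_prefix⟩)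
        · tauto
        · tauto
      · rintro ((⟨h1, h2, h3, -⟩ | h) | (⟨h1, h2, h3, -⟩ | h))
        · subst h1; subst h2; subst h3; exact Or.inl ⟨rfl, rfl, Or.inl rfl⟩
        · tauto
        · subst h1; subst h2; subst h3; exact Or.inl ⟨rfl, rfl, Or.inr rfl⟩
        · tauto

theorem fold_inv (rest : List Char) (a b : Char) (vk : Int) (flag : Bool) :
    ∃ p q, rest.foldl pvStep (vk, flag, some a, some b) =
      (vk + (pairVK (b :: rest) : Int), flag || hasTriple (a :: b :: rest), p, q) := by
  induction rest generalizing a b vk flag with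
  | nil => exact ⟨some a, some b, by simp [pairVK, hasTriple]⟩
  | cons c rest ih =>
    rw [List.foldl_cons]
    have hstep : pvStep (vk, flag, some a, some b) c =
        ((if b = 'V' ∧ c = 'K' then vk + 1 else vk),
         (if a = b ∧ b = c ∧ (c = 'V' ∨ c = 'K') then true else flag), some b, some c) := by
      simp [pvStep]
    rw [hstep]
    obtain ⟨p, q, hq⟩ := ih b c (if b = 'V' ∧ c = 'K' then vk + 1 else vk)
      (if a = b ∧ b = c ∧ (c = 'V' ∨ c = 'K') then true else flag)
    refine ⟨p, q, hq.trans ?_⟩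
    have hvk : (if b = 'V' ∧ c = 'K' then vk + 1 else vk) + (pairVK (c :: rest) : Int)
        = vk + (pairVK (b :: c :: rest) : Int) := by
      show _ = vk + (((if b = 'V' ∧ c = 'K' then 1 else 0) + pairVK (c :: rest) : Nat) : Int)
      split_ifs with hbc <;> push_cast <;> ring
    have hflag : ((if a = b ∧ b = c ∧ (c = 'V' ∨ c = 'K') then true else flag)
          || hasTriple (b :: c :: rest))
        = (flag || hasTriple (a :: b :: c :: rest)) := by
      by_cases habc : a = b ∧ b = c ∧ (c = 'V' ∨ c = 'K')
      · obtain ⟨h1, h2, h3⟩ := habc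
        subst h1; subst h2
        simp [hasTriple, h3]
      · rw [if_neg habc]
        have hne : ¬ (a = b ∧ b = c ∧ (a = 'V' ∨ a = 'K')) := by
          intro ⟨h1, h2, h3⟩; exact habc ⟨h1, h2, by subst h1; subst h2; exact h3⟩
        simp [hasTriple, hne]
    rw [hvk, hflag]

theorem fold_full (cs : List Char) :
    ∃ p q, cs.foldl pvStep ((0 : Int), false, none, none) =
      ((pairVK cs : Int), hasTriple cs, p, q) := by
  match cs with
  | [] => exact ⟨none, none, by simp [pairVK, hasTriple]⟩
  | [c] =>
    refine ⟨none, some c, ?_⟩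
    simp [pvStep, pairVK, hasTriple]
  | c₁ :: c₂ :: rest =>
    rw [List.foldl_cons, List.foldl_cons]
    have h1 : pvStep ((0 : Int), false, none, none) c₁ = (0, false, none, some c₁) := by
      simp [pvStep]
    rw [h1]
    have h2 : pvStep ((0 : Int), false, none, some c₁) c₂ =
        ((if c₁ = 'V' ∧ c₂ = 'K' then (1 : Int) else 0), false, some c₁, some c₂) := by
      simp [pvStep]
    rw [h2]
    obtain ⟨p, q, hq⟩ := fold_inv rest c₁ c₂ _ _
    refine ⟨p, q, hq.trans ?_⟩
    have : (if c₁ = 'V' ∧ c₂ = 'K' then (1 : Int) else 0) + (pairVK (c₂ :: rest) : Int)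
        = (pairVK (c₁ :: c₂ :: rest) : Int) := by
      show _ = (((if c₁ = 'V' ∧ c₂ = 'K' then 1 else 0) + pairVK (c₂ :: rest) : Nat) : Int)
      split_ifs with h <;> push_cast <;> ring
    rw [this]
    simp

-- ===== VERDICT (by name: the statement is the Claim_ definition above) =====
theorem func_spec : Claim_equal_func := by
  intro string _
  unfold Spec_func func func_alt
  simp only [PySem.Str.len_eq]
  by_cases hl1 : (string.toList.length : Int) = 1
  · rw [if_pos hl1, if_pos hl1]
  · rw [if_neg hl1, if_neg hl1]
    by_cases hl2 : (string.toList.length : Int) = 2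
    · rw [if_pos hl2, if_pos hl2]
      by_cases hkv : string = "KV"
      · rw [if_neg (not_not_intro hkv), if_pos hkv]
      · rw [if_pos hkv, if_neg hkv]
    · rw [if_neg hl2, if_neg hl2]
      obtain ⟨p, q, hq⟩ := fold_full string.toList
      rw [hq]
      simp only
      rw [count_VK]
      congr 1
      congr 1
      by_cases hP : PySem.Str.slice string none (some 3) = "KKV" ∨
          PySem.Str.slice string (some (-3)) none = "KVV"
      · rw [if_pos hP, if_pos hP]
        simp
      · rw [if_neg hP, if_neg hP]
        by_cases ht : hasTriple string.toList = true
        · rcases (hasTriple_iff string.toList).mp ht with hv | hk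
          · have hc : PySem.Str.count string "VVV" ≠ 0 := by
              intro h0
              exact (count_eq_zero_iff string "VVV" (by decide)).mp h0 (by simpa using hv)
            rw [if_pos hc, if_pos ht]
          · by_cases hv : PySem.Str.count string "VVV" ≠ 0
            · rw [if_pos hv, if_pos ht]
            · have hc : PySem.Str.count string "KKK" ≠ 0 := by
                intro h0
                exact (count_eq_zero_iff string "KKK" (by decide)).mp h0 (by simpa using hk)
              rw [if_neg hv, if_pos hc, if_pos ht]
        · have hni := fun hc => ht ((hasTriple_iff string.toList).mpr hc)
          have hv : PySem.Str.count string "VVV" = 0 := by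
            rw [count_eq_zero_iff string "VVV" (by decide)]
            intro hc; exact hni (Or.inl (by simpa using hc))
          have hk : PySem.Str.count string "KKK" = 0 := by
            rw [count_eq_zero_iff string "KKK" (by decide)]
            intro hc; exact hni (Or.inr (by simpa using hc))
          rw [if_neg (not_not_intro hv), if_neg (not_not_intro hk), if_neg ht]
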